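/- GENERATED by mk_final_copies.py from the proof of the farm's unit `vorbis_decode_packet_rest.4e` (farm:vorbis_decode_packet_rest.4e.1: Proof.lean) as the
   re-elaboration sweep compiled it — do not edit. -/
import Asan.CheckWalk
import Vorbis.Spec.Units.vorbis_decode_packet_rest_4e
import Vorbis.Spec.Worked.vorbis_decode_packet_rest_4e_Lemmas

open X86 X86.User Asan Vorbis Vorbis.Spec Vorbis.Spec.vorbis_decode_packet_rest

/-- Segment .4e of `vorbis_decode_packet_rest` (0x110ce2 … 0x110d0a): `finalY[offset++] = temp`, `++k`, from `At4e` to the loop head `At4K … (k + 1)`: lemma `segE` of Lemmas.lean (the farm worker's sub-segment E). -/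
theorem Vorbis.Spec.Worked.vorbis_decode_packet_rest_4e_ok : Vorbis.Spec.vorbis_decode_packet_rest_4e.Statement := by
  intro Lay hLay μ hμ u₀ hcode hs2
  exact Vorbis.Spec.vorbis_decode_packet_rest_4e.segE hLay hμ hcode hs2
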